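-- pv_equiv track=rewrite | github.com/Giammash/Robustic | mindmove/model/templates/data_loading.py | extract_intervals
-- ===== SOURCE A (Python) =====
-- def extract_intervals(timestamps, values):
--     intervals = []
--     current_start = None
--
--     for t, v in zip(timestamps, values):
--         if v == 1 and current_start is None:
--             # Activation begins
--             current_start = t
--         elif v == 0 and current_start is not None:
--             # Activation ends
--             intervals.append((current_start, t))
--             current_start = None
--
--     # If recording ended while still active
--     if current_start is not None:
--         intervals.append((current_start, timestamps[-1]))
--
--     return intervals
-- ===== SOURCE B (Python) =====
-- def extract_intervals(timestamps, values):
--     # Phase 1: carry-forward active-state table (1 -> on, 0 -> off, other values keep state).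
--     states = []
--     active = False
--     for t, v in zip(timestamps, values):
--         if v == 1:
--             active = True
--         elif v == 0:
--             active = False
--         states.append((t, active))
--
--     # Phase 2: read off run boundaries by comparing each state with its predecessor.
--     padded = [(None, False)] + states
--     starts = [t for (_, p), (t, a) in zip(padded, states) if a and not p]
--     ends = [t for (_, p), (t, a) in zip(padded, states) if p and not a]
--     if states and states[-1][1]:
--         ends.append(timestamps[-1])
--     return list(zip(starts, ends))
-- ===== Notes on version B (the rewrite author's own statement) =====
-- stated objective: alternative
-- what changed: B replaces A's incremental if/elif state machine with two passes: first build a carry-forward (timestamp, active) state table, then extract rising/falling edges into separate start and end lists by comparing each state with its predecessor and zip them into intervals.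
import Mathlib
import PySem

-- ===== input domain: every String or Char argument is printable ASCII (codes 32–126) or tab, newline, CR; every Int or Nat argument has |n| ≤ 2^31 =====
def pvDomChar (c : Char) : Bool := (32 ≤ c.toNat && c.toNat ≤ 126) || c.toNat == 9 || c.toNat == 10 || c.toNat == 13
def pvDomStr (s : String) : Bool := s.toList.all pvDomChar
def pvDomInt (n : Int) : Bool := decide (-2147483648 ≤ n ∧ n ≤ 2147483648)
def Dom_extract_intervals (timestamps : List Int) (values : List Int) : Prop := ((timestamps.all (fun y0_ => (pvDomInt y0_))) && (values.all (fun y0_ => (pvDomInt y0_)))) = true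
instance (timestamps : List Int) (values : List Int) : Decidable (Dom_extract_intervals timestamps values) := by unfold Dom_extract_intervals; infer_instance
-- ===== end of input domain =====

-- B replaces A's single if/elif state-machine scan by a two-pass decomposition
-- (build a carry-forward state table, then zip the extracted run boundaries);
-- same cost, alternative structure.


-- ===== PORT A =====
def extract_intervals (timestamps : List Int) (values : List Int) : List (Int × Int) :=
  let r := (List.zip timestamps values).foldl
    (fun (acc : List (Int × Int) × Option Int) tv =>
      if tv.2 == 1 && acc.2.isNone then (acc.1, some tv.1)
      else if tv.2 == 0 && acc.2.isSome then (acc.1 ++ [(acc.2.getD 0, tv.1)], none)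
      else acc) ([], none)
  match r.2 with
  | some s => r.1 ++ [(s, (PySem.List.pyGet? timestamps (-1)).getD 0)]
  | none => r.1

-- ===== PORT B =====
def extract_intervals_alt (timestamps : List Int) (values : List Int) : List (Int × Int) :=
  let st := ((List.zip timestamps values).foldl
    (fun (acc : List (Int × Bool) × Bool) tv =>
      let active := if tv.2 == 1 then true else if tv.2 == 0 then false else acc.2
      (acc.1 ++ [(tv.1, active)], active)) ([], false)).1
  let padded : List (Int × Bool) := (0, false) :: st
  let starts := (List.zip padded st).filterMap
    (fun pc => if pc.2.2 && !pc.1.2 then some pc.2.1 else none)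
  let ends0 := (List.zip padded st).filterMap
    (fun pc => if pc.1.2 && !pc.2.2 then some pc.2.1 else none)
  let ends := if (st.getLast?.map Prod.snd).getD false
              then ends0 ++ [(PySem.List.pyGet? timestamps (-1)).getD 0]
              else ends0
  List.zip starts ends

-- ===== PRECONDITION & SPEC =====
def Spec_extract_intervals (timestamps : List Int) (values : List Int) (out : List (Int × Int)) : Prop := out = extract_intervals_alt timestamps values
instance (timestamps : List Int) (values : List Int) (out : List (Int × Int)) : Decidable (Spec_extract_intervals timestamps values out) := by unfold Spec_extract_intervals; infer_instance

-- ===== CLAIM (what is proved, stated in full; the proofs are below) =====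
def Claim_equal_extract_intervals : Prop := ∀ (timestamps : List Int) (values : List Int), Dom_extract_intervals timestamps values → Spec_extract_intervals timestamps values (extract_intervals timestamps values)

-- ===== LEMMAS AND PROOFS =====

/-- the carry-forward state update of both programs -/
def pvStep (b : Bool) (v : Int) : Bool := if v == 1 then true else if v == 0 then false else b

/-- recursive version of B's state table -/
def pvStates (b : Bool) : List (Int × Int) → List (Int × Bool)
  | [] => []
  | (t, v) :: L => (t, pvStep b v) :: pvStates (pvStep b v) L

/-- rising-edge timestamps relative to a previous activity `p` -/
def pvStarts (p : Bool) : List (Int × Bool) → List Int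
  | [] => []
  | (t, a) :: xs => (if a && !p then [t] else []) ++ pvStarts a xs

/-- falling-edge timestamps relative to a previous activity `p` -/
def pvEnds (p : Bool) : List (Int × Bool) → List Int
  | [] => []
  | (t, a) :: xs => (if p && !a then [t] else []) ++ pvEnds a xs

/-- recursive version of A's loop (without the accumulator) -/
def pvPairsA (cs : Option Int) : List (Int × Int) → List (Int × Int) × Option Int
  | [] => ([], cs)
  | (t, v) :: L =>
    if v == 1 && cs.isNone then pvPairsA (some t) L
    else if v == 0 && cs.isSome then
      ((cs.getD 0, t) :: (pvPairsA none L).1, (pvPairsA none L).2)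
    else pvPairsA cs L

theorem pvFoldA (L : List (Int × Int)) : ∀ (acc : List (Int × Int)) (cs : Option Int),
    L.foldl (fun (acc : List (Int × Int) × Option Int) tv =>
      if tv.2 == 1 && acc.2.isNone then (acc.1, some tv.1)
      else if tv.2 == 0 && acc.2.isSome then (acc.1 ++ [(acc.2.getD 0, tv.1)], none)
      else acc) (acc, cs)
    = (acc ++ (pvPairsA cs L).1, (pvPairsA cs L).2) := by
  induction L with
  | nil => intro acc cs; simp [pvPairsA]
  | cons tv L ih =>
    intro acc cs
    obtain ⟨t, v⟩ := tv
    simp only [List.foldl_cons, pvPairsA]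
    by_cases h1 : (v == 1 && cs.isNone) = true
    · simp only [if_pos h1, ih]
    · simp only [if_neg h1]
      by_cases h0 : (v == 0 && cs.isSome) = true
      · simp only [if_pos h0, ih]; simp
      · simp only [if_neg h0, ih]

theorem pvGetLastConsNe {α : Type} (a : α) (l : List α) (h : l ≠ []) :
    (a :: l).getLast? = l.getLast? := by
  cases l with
  | nil => exact absurd rfl h
  | cons x xs => simp [List.getLast?_cons_cons]

theorem pvLastCons (t : Int) (a : Bool) (st : List (Int × Bool)) (b : Bool) :
    ((((t, a) :: st).getLast?).map Prod.snd).getD b = ((st.getLast?.map Prod.snd).getD a) := by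
  cases st with
  | nil => simp
  | cons x xs =>
    obtain ⟨y, hy⟩ : ∃ y, (x :: xs).getLast? = some y := by
      induction xs generalizing x with
      | nil => exact ⟨x, rfl⟩
      | cons z zs ih => rw [List.getLast?_cons_cons]; exact ih z
    simp [List.getLast?_cons_cons, hy]

theorem pvFoldB (L : List (Int × Int)) : ∀ (acc : List (Int × Bool)) (b : Bool),
    L.foldl (fun (acc : List (Int × Bool) × Bool) tv =>
      let active := if tv.2 == 1 then true else if tv.2 == 0 then false else acc.2
      (acc.1 ++ [(tv.1, active)], active)) (acc, b)
    = (acc ++ pvStates b L, ((pvStates b L).getLast?.map Prod.snd).getD b) := by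
  induction L with
  | nil => intro acc b; simp [pvStates]
  | cons tv L ih =>
    intro acc b
    obtain ⟨t, v⟩ := tv
    simp only [List.foldl_cons, pvStates, pvStep, ih, pvLastCons]
    simp

theorem pvZipStarts (st : List (Int × Bool)) : ∀ (d : Int) (p : Bool),
    (List.zip ((d, p) :: st) st).filterMap
      (fun pc => if pc.2.2 && !pc.1.2 then some pc.2.1 else none) = pvStarts p st := by
  induction st with
  | nil => intro d p; simp [pvStarts]
  | cons x xs ih =>
    intro d p
    obtain ⟨t, a⟩ := x
    simp only [List.zip_cons_cons, List.filterMap, pvStarts, ih]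
    by_cases h : (a && !p) = true <;> simp [h]

theorem pvZipEnds (st : List (Int × Bool)) : ∀ (d : Int) (p : Bool),
    (List.zip ((d, p) :: st) st).filterMap
      (fun pc => if pc.1.2 && !pc.2.2 then some pc.2.1 else none) = pvEnds p st := by
  induction st with
  | nil => intro d p; simp [pvEnds]
  | cons x xs ih =>
    intro d p
    obtain ⟨t, a⟩ := x
    simp only [List.zip_cons_cons, List.filterMap, pvEnds, ih]
    by_cases h : (p && !a) = true <;> simp [h]

/-- zip with one extra element on the left absorbs a snoc on the right as a final pair -/
theorem pvZipSnoc : ∀ (EE SS : List Int) (T x : Int),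
    SS.length = EE.length + 1 → SS.getLast? = some x →
    List.zip SS (EE ++ [T]) = List.zip SS EE ++ [(x, T)] := by
  intro EE
  induction EE with
  | nil =>
    intro SS T x hl hx
    match SS, hl with
    | [s], _ => simp at hx; simp [hx]
  | cons e EE ih =>
    intro SS T x hl hx
    match SS, hl with
    | s :: SS', hl =>
      have hne : SS' ≠ [] := by
        intro h; subst h; simp at hl
      rw [pvGetLastConsNe s SS' hne] at hx
      simp only [List.zip_cons_cons, List.cons_append]
      rw [ih SS' T x (by simpa using hl) hx]

/-- main invariant relating A's recursion to B's edge lists -/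
theorem pvMain (L : List (Int × Int)) : ∀ (cs : Option Int),
    (pvPairsA cs L).1 = List.zip (cs.toList ++ pvStarts cs.isSome (pvStates cs.isSome L)) (pvEnds cs.isSome (pvStates cs.isSome L))
  ∧ (pvPairsA cs L).2.isSome = (((pvStates cs.isSome L).getLast?.map Prod.snd).getD cs.isSome)
  ∧ (∀ x, (pvPairsA cs L).2 = some x →
      (cs.toList ++ pvStarts cs.isSome (pvStates cs.isSome L)).length = (pvEnds cs.isSome (pvStates cs.isSome L)).length + 1
      ∧ (cs.toList ++ pvStarts cs.isSome (pvStates cs.isSome L)).getLast? = some x)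
  ∧ ((pvPairsA cs L).2 = none → (cs.toList ++ pvStarts cs.isSome (pvStates cs.isSome L)).length = (pvEnds cs.isSome (pvStates cs.isSome L)).length) := by
  induction L with
  | nil =>
    intro cs
    cases cs <;> simp [pvPairsA, pvStates, pvStarts, pvEnds]
  | cons tv L ih =>
    intro cs
    obtain ⟨t, v⟩ := tv
    by_cases hv1 : v = 1
    · cases cs with
      | none =>
        have h := ih (some t)
        simpa [pvPairsA, pvStates, pvStep, pvStarts, pvEnds, hv1, pvLastCons] using h
      | some s =>
        have h := ih (some s)
        simpa [pvPairsA, pvStates, pvStep, pvStarts, pvEnds, hv1, pvLastCons] using h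
    · by_cases hv0 : v = 0
      · cases cs with
        | none =>
          have h := ih none
          simpa [pvPairsA, pvStates, pvStep, pvStarts, pvEnds, hv1, hv0, pvLastCons] using h
        | some s =>
          obtain ⟨h1, h2, h3, h4⟩ := ih none
          simp only [Option.toList_none, List.nil_append, Option.isSome_none] at h1 h2 h3 h4
          refine ⟨?_, ?_, ?_, ?_⟩
          · simp [pvPairsA, pvStates, pvStep, pvStarts, pvEnds, hv0, h1]
          · simpa [pvPairsA, pvStates, pvStep, pvStarts, pvEnds, hv1, hv0, pvLastCons] using h2
          · intro x hx
            have hx' : (pvPairsA none L).2 = some x := by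
              simpa [pvPairsA, hv1, hv0] using hx
            obtain ⟨hl, hg⟩ := h3 x hx'
            have hne : pvStarts false (pvStates false L) ≠ [] := by
              intro h; rw [h] at hl; simp at hl
            constructor
            · simp only [pvStates, pvStep, pvStarts, pvEnds, hv0]
              simp [hl]
            · simp only [pvStates, pvStep, pvStarts, hv0]
              simpa [pvGetLastConsNe _ _ hne] using hg
          · intro hx
            have hx' : (pvPairsA none L).2 = none := by
              simpa [pvPairsA, hv1, hv0] using hx
            have hl := h4 hx'
            simp only [pvStates, pvStep, pvStarts, pvEnds, hv0]
            simp [hl]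
      · cases cs with
        | none =>
          have h := ih none
          simpa [pvPairsA, pvStates, pvStep, pvStarts, pvEnds, hv1, hv0, pvLastCons] using h
        | some s =>
          have h := ih (some s)
          simpa [pvPairsA, pvStates, pvStep, pvStarts, pvEnds, hv1, hv0, pvLastCons] using h

-- ===== VERDICT (by name: the statement is the Claim_ definition above) =====
theorem extract_intervals_spec : Claim_equal_extract_intervals := by
  intro timestamps values _
  unfold Spec_extract_intervals extract_intervals extract_intervals_alt
  simp only [pvFoldA, pvFoldB, pvZipStarts, pvZipEnds, List.nil_append]
  obtain ⟨h1, h2, h3, h4⟩ := pvMain (List.zip timestamps values) none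
  simp only [Option.toList_none, List.nil_append, Option.isSome_none] at h1 h2 h3 h4
  cases hcs : (pvPairsA none (List.zip timestamps values)).2 with
  | none =>
    have hb : (((pvStates false (List.zip timestamps values)).getLast?.map Prod.snd).getD false) = false := by
      rw [← h2, hcs]; rfl
    simp [hb, h1]
  | some x =>
    have hb : (((pvStates false (List.zip timestamps values)).getLast?.map Prod.snd).getD false) = true := by
      rw [← h2, hcs]; rfl
    obtain ⟨hl, hg⟩ := h3 x hcs
    simp only [hb, if_pos]
    rw [pvZipSnoc _ _ ((PySem.List.pyGet? timestamps (-1)).getD 0) x hl hg, h1]
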